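-- pv_equiv track=rewrite | github.com/mmehmetaliyavuz/Motifer | Motifer/motifer/motif_utils.py | consensus_from_seqs
-- ===== SOURCE A (Python) =====
-- from collections import Counter
--
-- def consensus_from_seqs(seqs, ignore_chars=set("-."), tie_char="X"):
--     """It extracts a consensus sequence from aligned sequences."""
--     if not seqs:
--         return ""
--     L = max(len(s) for s in seqs)
--     consensus = []
--     for i in range(L):
--         col = []
--         for s in seqs:
--             if i < len(s):
--                 aa = s[i]
--                 if aa not in ignore_chars:
--                     col.append(aa)
--         if not col:
--             consensus.append("-")
--             continue
--         counts = Counter(col)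
--         mc = counts.most_common()
--         if len(mc) > 1 and mc[0][1] == mc[1][1]:
--             consensus.append(tie_char)
--         else:
--             consensus.append(mc[0][0])
--     return "".join(consensus)
-- ===== SOURCE B (Python) =====
-- def consensus_from_seqs(seqs, ignore_chars=set("-."), tie_char="X"):
--     """Consensus by one row-major counting pass into a per-column table, then a scan of the table."""
--     if not seqs:
--         return ""
--     L = max(len(s) for s in seqs)
--     table = [{} for _ in range(L)]
--     for s in seqs:
--         for i in range(len(s)):
--             aa = s[i]
--             if aa not in ignore_chars:
--                 t = table[i]
--                 t[aa] = t.get(aa, 0) + 1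
--     out = []
--     for counts in table:
--         if not counts:
--             out.append("-")
--             continue
--         m = max(counts.values())
--         top = [c for c, n in counts.items() if n == m]
--         if len(top) > 1:
--             out.append(tie_char)
--         else:
--             out.append(top[0])
--     return "".join(out)
-- ===== Notes on version B (the rewrite author's own statement) =====
-- stated objective: alternative
-- what changed: Replaces A's column-major loop that rebuilds a filtered list and a Counter with most_common (a sort) for every column by one row-major counting pass into a materialized table of per-column dict counters, followed by a second pass that emits '-', the tie char, or the unique max-count char per counter without any sorting.
import Mathlib
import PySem

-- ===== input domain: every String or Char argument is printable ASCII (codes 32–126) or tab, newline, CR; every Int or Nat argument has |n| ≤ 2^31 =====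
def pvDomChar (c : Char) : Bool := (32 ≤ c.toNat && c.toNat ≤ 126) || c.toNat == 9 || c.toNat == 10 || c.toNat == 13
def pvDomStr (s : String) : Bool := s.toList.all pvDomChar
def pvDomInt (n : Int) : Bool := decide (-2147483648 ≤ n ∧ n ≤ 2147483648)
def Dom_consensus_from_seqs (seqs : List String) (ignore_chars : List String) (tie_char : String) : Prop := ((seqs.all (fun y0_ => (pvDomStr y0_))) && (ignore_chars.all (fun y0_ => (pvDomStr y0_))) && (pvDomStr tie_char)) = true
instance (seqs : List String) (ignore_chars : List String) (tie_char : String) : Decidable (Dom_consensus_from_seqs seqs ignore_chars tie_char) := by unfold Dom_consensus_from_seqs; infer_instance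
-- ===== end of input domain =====

-- B replaces A's per-column list+Counter+most_common sort by one row-major counting pass into a
-- materialized per-column table of counters and a second sort-free pass over that table (objective:
-- alternative decomposition, same exact output).

-- ===== PORT A =====
def consensus_from_seqs (seqs : List String) (ignore_chars : List String) (tie_char : String) : String :=
  if seqs = [] then "" else
  let L : Nat := (seqs.map (fun s => s.toList.length)).foldl max 0
  let consensus : List String := (List.range L).foldl (fun acc i =>
    let col : List Char := seqs.foldl (fun col s =>
      if i < s.toList.length then
        let aa := s.toList.getD i ' '
        if String.ofList [aa] ∈ ignore_chars then col else col ++ [aa]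
      else col) []
    if col = [] then acc ++ ["-"]
    else
      let counts := PySem.Dict.counter col
      let mc := PySem.List.sorted counts.items (fun p => p.2) true
      match mc with
      | [] => acc                       -- unreachable: col ≠ [] (Python would raise on mc[0])
      | [p0] => acc ++ [String.ofList [p0.1]]
      | p0 :: p1 :: _ => if p0.2 == p1.2 then acc ++ [tie_char] else acc ++ [String.ofList [p0.1]]) []
  PySem.Str.join "" consensus

-- ===== PORT B =====
def consensus_from_seqs_alt (seqs : List String) (ignore_chars : List String) (tie_char : String) : String :=
  if seqs = [] then "" else
  let L : Nat := (seqs.map (fun s => s.toList.length)).foldl max 0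
  let table0 : List (PySem.Dict Char Int) := (List.range L).map (fun _ => PySem.Dict.empty)
  let table := seqs.foldl (fun tb s =>
    (List.range s.toList.length).foldl (fun tb i =>
      let aa := s.toList.getD i ' '
      if String.ofList [aa] ∈ ignore_chars then tb
      else tb.modify i (fun t => t.insert aa (t.getD aa 0 + 1))) tb) table0
  let out : List String := table.foldl (fun out counts =>
    if counts.items.isEmpty then out ++ ["-"]
    else
      let m := (PySem.List.max? counts.values (fun v => v)).getD 0
      let top := (counts.items.filter (fun p => p.2 == m)).map (fun p => p.1)
      if 1 < top.length then out ++ [tie_char] else out ++ [String.ofList [top.headD ' ']]) []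
  PySem.Str.join "" out

-- ===== PRECONDITION & SPEC =====
def Spec_consensus_from_seqs (seqs : List String) (ignore_chars : List String) (tie_char : String) (out : String) : Prop := out = consensus_from_seqs_alt seqs ignore_chars tie_char
instance (seqs : List String) (ignore_chars : List String) (tie_char : String) (out : String) : Decidable (Spec_consensus_from_seqs seqs ignore_chars tie_char out) := by unfold Spec_consensus_from_seqs; infer_instance

-- ===== CLAIM (what is proved, stated in full; the proofs are below) =====
def Claim_equal_consensus_from_seqs : Prop := ∀ (seqs : List String) (ignore_chars : List String) (tie_char : String), Dom_consensus_from_seqs seqs ignore_chars tie_char → Spec_consensus_from_seqs seqs ignore_chars tie_char (consensus_from_seqs seqs ignore_chars tie_char)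

-- ===== LEMMAS AND PROOFS =====

-- the filtered column i, read row by row (proof-only helper)
def colAt (seqs : List String) (ignore_chars : List String) (i : Nat) : List Char :=
  seqs.flatMap (fun s =>
    if i < s.toList.length ∧ ¬ (String.ofList [s.toList.getD i ' '] ∈ ignore_chars) then [s.toList.getD i ' '] else [])

-- A's inner column loop builds exactly colAt
lemma colA_eq (seqs ignore_chars : List String) (i : Nat) :
    seqs.foldl (fun col s =>
      if i < s.toList.length then
        let aa := s.toList.getD i ' '
        if String.ofList [aa] ∈ ignore_chars then col else col ++ [aa]
      else col) [] = colAt seqs ignore_chars i := by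
  have h : seqs.foldl (fun col s =>
      if i < s.toList.length then
        let aa := s.toList.getD i ' '
        if String.ofList [aa] ∈ ignore_chars then col else col ++ [aa]
      else col) [] = seqs.foldl (fun col s =>
        col ++ (if i < s.toList.length ∧ ¬ (String.ofList [s.toList.getD i ' '] ∈ ignore_chars)
                then [s.toList.getD i ' '] else [])) [] := by
    apply PySem.List.foldl_congr_mem
    intro acc s _
    dsimp only
    (split_ifs with h1 h2 h3 <;> simp_all) <;> omega
  rw [h, PySem.List.foldl_append_eq_flatMap]
  rfl

-- one row of B's counting pass, observed at index j
lemma row_getElem? (ignore_chars : List String) (cs : List Char) (tb : List (PySem.Dict Char Int)) (n : Nat) (j : Nat) :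
    ((List.range n).foldl (fun tb i =>
      let aa := cs.getD i ' '
      if String.ofList [aa] ∈ ignore_chars then tb
      else tb.modify i (fun t => t.insert aa (t.getD aa 0 + 1))) tb)[j]? =
    if j < n ∧ ¬ (String.ofList [cs.getD j ' '] ∈ ignore_chars)
    then (tb[j]?).map (fun t => t.insert (cs.getD j ' ') (t.getD (cs.getD j ' ') 0 + 1))
    else tb[j]? := by
  induction n generalizing tb with
  | zero => simp
  | succ n ih =>
    rw [List.range_succ, List.foldl_append]
    dsimp only [List.foldl]
    by_cases hm : String.ofList [cs.getD n ' '] ∈ ignore_chars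
    · rw [if_pos hm, ih]
      by_cases hj : j < n
      · have : (j < n + 1) = (j < n) := by simp; omega
        simp only [this]
      · have hjn : ¬ (j < n) := hj
        by_cases hje : j = n
        · subst hje
          have e1 : ¬ (j < j ∧ ¬ (String.ofList [cs.getD j ' '] ∈ ignore_chars)) := fun ⟨a, _⟩ => absurd a (by omega)
          have e2 : ¬ (j < j + 1 ∧ ¬ (String.ofList [cs.getD j ' '] ∈ ignore_chars)) := fun ⟨_, b⟩ => b hm
          rw [if_neg e1, if_neg e2]
        · have h1 : ¬ (j < n + 1 ∧ ¬ (String.ofList [cs.getD j ' '] ∈ ignore_chars)) := by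
            intro ⟨a, b⟩; have : j = n := by omega
            exact b (this ▸ hm)
          simp only [if_neg h1, if_neg (by exact fun ⟨a, b⟩ => hjn a :
            ¬ (j < n ∧ ¬ (String.ofList [cs.getD j ' '] ∈ ignore_chars)))]
    · rw [if_neg hm, List.getElem?_modify, ih]
      by_cases hje : j = n
      · subst hje
        have e1 : ¬ (j < j ∧ ¬ (String.ofList [cs.getD j ' '] ∈ ignore_chars)) := fun ⟨a, _⟩ => absurd a (by omega)
        rw [if_neg e1, if_pos ⟨Nat.lt_succ_self j, hm⟩]
        cases tb[j]? <;> simp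
      · by_cases hj : j < n
        · have e1 : (j < n + 1) = True := by simp; omega
          have e2 : (j < n) = True := by simp; omega
          simp only [e1, e2, true_and, if_neg (Ne.symm hje : ¬ n = j)]
          split <;> simp
        · have e1 : ¬ (j < n + 1 ∧ ¬ (String.ofList [cs.getD j ' '] ∈ ignore_chars)) := by
            intro ⟨a, b⟩; exact hje (by omega)
          have e2 : ¬ (j < n ∧ ¬ (String.ofList [cs.getD j ' '] ∈ ignore_chars)) := by
            intro ⟨a, b⟩; exact hj a
          simp only [if_neg e1, if_neg e2, if_neg (Ne.symm hje : ¬ n = j)]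
          cases tb[j]? <;> rfl

-- the whole row-major pass, observed at index j
lemma table_getElem? (ignore_chars : List String) (seqs : List String) (tb : List (PySem.Dict Char Int)) (j : Nat) :
    (seqs.foldl (fun tb s =>
      (List.range s.toList.length).foldl (fun tb i =>
        let aa := s.toList.getD i ' '
        if String.ofList [aa] ∈ ignore_chars then tb
        else tb.modify i (fun t => t.insert aa (t.getD aa 0 + 1))) tb) tb)[j]? =
    (tb[j]?).map (fun t => (colAt seqs ignore_chars j).foldl (fun t a => t.insert a (t.getD a 0 + 1)) t) := by
  induction seqs generalizing tb with
  | nil => simp [colAt]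
  | cons s rest ih =>
    rw [List.foldl_cons, ih, row_getElem?]
    have hcol : colAt (s :: rest) ignore_chars j =
        (if j < s.toList.length ∧ ¬ (String.ofList [s.toList.getD j ' '] ∈ ignore_chars)
         then [s.toList.getD j ' '] else []) ++ colAt rest ignore_chars j := by
      simp [colAt]
    rw [hcol]
    by_cases hc : j < s.toList.length ∧ ¬ (String.ofList [s.toList.getD j ' '] ∈ ignore_chars)
    · rw [if_pos hc, if_pos hc]
      cases tb[j]? <;> simp
    · rw [if_neg hc, if_neg hc]
      cases tb[j]? <;> simp

-- B's finished table is the per-column counters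
lemma table_eq (ignore_chars : List String) (seqs : List String) (L : Nat) :
    seqs.foldl (fun tb s =>
      (List.range s.toList.length).foldl (fun tb i =>
        let aa := s.toList.getD i ' '
        if String.ofList [aa] ∈ ignore_chars then tb
        else tb.modify i (fun t => t.insert aa (t.getD aa 0 + 1))) tb)
      ((List.range L).map (fun _ => PySem.Dict.empty)) =
    (List.range L).map (fun j => PySem.Dict.counter (colAt seqs ignore_chars j)) := by
  apply List.ext_getElem?
  intro j
  rw [table_getElem?]
  by_cases hj : j < L
  · rw [List.getElem?_map, List.getElem?_map, List.getElem?_range hj]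
    show some _ = some _
    congr 1
  · rw [List.getElem?_map, List.getElem?_map,
      List.getElem?_eq_none (by simpa using Nat.le_of_not_lt hj)]
    rfl

lemma length_one_eq_singleton {α : Type} {l : List α} {x : α} (h : l.length = 1) (hx : x ∈ l) : l = [x] := by
  match l, h with
  | [y], _ => cases hx with
    | head => rfl
    | tail _ h' => cases h'

-- per-column decision: A's most_common head/tie test = B's max-count scan
lemma decide_eq (col : List Char) (h : col ≠ []) (tie_char : String) :
    (match PySem.List.sorted (PySem.Dict.counter col).items (fun p => p.2) true with
      | [] => ([] : List String)
      | [p0] => [String.ofList [p0.1]]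
      | p0 :: p1 :: _ => if p0.2 == p1.2 then [tie_char] else [String.ofList [p0.1]]) =
    (let counts := PySem.Dict.counter col
     let m := (PySem.List.max? counts.values (fun v => v)).getD 0
     let top := (counts.items.filter (fun p => p.2 == m)).map (fun p => p.1)
     if 1 < top.length then [tie_char] else [String.ofList [top.headD ' ']]) := by
  dsimp only
  set counts := PySem.Dict.counter col with hcounts
  -- the items list is nonempty
  have hitems : counts.items ≠ [] := by
    obtain ⟨c, col', rfl⟩ := List.exists_cons_of_ne_nil h
    have hc : c ∈ PySem.Set.ofList (c :: col') := by
      rw [PySem.Set.mem_ofList]; exact List.mem_cons_self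
    intro he
    rw [hcounts, PySem.Dict.items_counter] at he
    simp only [List.map_eq_nil_iff] at he
    rw [he] at hc; cases hc
  -- the max of the values
  have hvals : counts.values = counts.items.map (fun p => p.2) := rfl
  obtain ⟨q, hq⟩ : ∃ q, PySem.List.max? counts.values (fun v => v) = some q := by
    cases hmq : PySem.List.max? counts.values (fun v => v) with
    | none =>
      rw [PySem.List.max?_eq_none_iff] at hmq
      rw [hvals] at hmq
      exact absurd (List.map_eq_nil_iff.mp hmq) hitems
    | some q => exact ⟨q, rfl⟩
  rw [hq]
  have hqval : (Option.some q).getD 0 = q := rfl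
  rw [hqval]
  have hqmem : q ∈ counts.items.map (fun p => p.2) := by rw [← hvals]; exact PySem.List.max?_mem hq
  have hqmax : ∀ p ∈ counts.items, p.2 ≤ q := by
    intro p hp
    have := PySem.List.max?_isMax hq p.2 (by rw [hvals]; exact List.mem_map_of_mem hp)
    simpa using this
  -- the sorted list
  cases hmc : PySem.List.sorted counts.items (fun p => p.2) true with
  | nil =>
    rw [PySem.List.sorted_eq_nil_iff] at hmc
    exact absurd hmc hitems
  | cons p0 rest =>
    have hperm : (p0 :: rest).Perm counts.items := hmc ▸ PySem.List.sorted_perm counts.items (fun p => p.2) true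
    have hp0mem : p0 ∈ counts.items := hperm.mem_iff.mp List.mem_cons_self
    have hp0ge : ∀ y ∈ counts.items, y.2 ≤ p0.2 := PySem.List.key_head_sorted_rev_ge counts.items (fun p => p.2) hmc
    have hp0q : p0.2 = q := by
      obtain ⟨p', hp'mem, hp'⟩ := List.mem_map.mp hqmem
      exact le_antisymm (hqmax p0 hp0mem) (hp' ▸ hp0ge p' hp'mem)
    have hfl : ((p0 :: rest).filter (fun p => p.2 == q)).length = (counts.items.filter (fun p => p.2 == q)).length :=
      (hperm.filter (fun p => p.2 == q)).length_eq
    have hfl0 : (p0 :: rest).filter (fun p => p.2 == q) = p0 :: rest.filter (fun p => p.2 == q) := by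
      rw [List.filter_cons, if_pos (by simpa using hp0q)]
    cases rest with
    | nil =>
      -- unique entry: items.filter has length 1 and contains p0
      have hlen : (counts.items.filter (fun p => p.2 == q)).length = 1 := by
        rw [← hfl, hfl0]; simp
      have hp0f : p0 ∈ counts.items.filter (fun p => p.2 == q) :=
        List.mem_filter.mpr ⟨hp0mem, by simpa using hp0q⟩
      have : counts.items.filter (fun p => p.2 == q) = [p0] := length_one_eq_singleton hlen hp0f
      dsimp only
      rw [this]
      simp
    | cons p1 rest2 =>
      have hpw : (p0 :: p1 :: rest2).Pairwise (fun a b => b.2 ≤ a.2) := by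
        have := PySem.List.sorted_pairwise_rev counts.items (fun p => p.2)
        rw [hmc] at this; exact this
      have hp1mem : p1 ∈ counts.items := hperm.mem_iff.mp (by simp)
      by_cases htie : p0.2 = p1.2
      · -- tie: at least two entries reach the max
        have h2 : 1 < (counts.items.filter (fun p => p.2 == q)).length := by
          rw [← hfl, hfl0]
          have hp1f' : p1 ∈ (p1 :: rest2).filter (fun p => p.2 == q) := by
            rw [List.filter_cons, if_pos (by simpa using (htie ▸ hp0q : p1.2 = q))]
            exact List.mem_cons_self
          have := List.length_pos_of_mem hp1f'
          simp only [List.length_cons]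
          omega
        dsimp only
        rw [if_pos (show (p0.2 == p1.2) = true by simpa using htie),
            if_pos (show 1 < ((counts.items.filter (fun p => p.2 == q)).map (fun p => p.1)).length by
              simpa using h2)]
      · -- no tie: p0 is the unique entry with the max count
        have hrest : (p1 :: rest2).filter (fun p => p.2 == q) = [] := by
          rw [List.filter_eq_nil_iff]
          intro p hp hbq
          have hpq : p.2 = q := by simpa using hbq
          have hple : p.2 ≤ p1.2 := by
            rcases hp with _ | hp
            · exact le_refl _
            · exact (List.pairwise_cons.mp (List.pairwise_cons.mp hpw).2).1 p (by assumption)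
          have : p1.2 = q := le_antisymm (hqmax p1 hp1mem) (hpq ▸ hple)
          exact htie (hp0q.trans this.symm)
        have hlen : (counts.items.filter (fun p => p.2 == q)).length = 1 := by
          rw [← hfl, hfl0, hrest]
          rfl
        have hp0f : p0 ∈ counts.items.filter (fun p => p.2 == q) :=
          List.mem_filter.mpr ⟨hp0mem, by simpa using hp0q⟩
        have hsing : counts.items.filter (fun p => p.2 == q) = [p0] := length_one_eq_singleton hlen hp0f
        dsimp only
        rw [if_neg (show ¬ ((p0.2 == p1.2) = true) by simpa using htie), hsing]
        simp

-- what A emits for column i (proof-only helper)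
def gA (seqs ignore_chars : List String) (tie_char : String) (i : Nat) : List String :=
  if colAt seqs ignore_chars i = [] then ["-"]
  else
    match PySem.List.sorted (PySem.Dict.counter (colAt seqs ignore_chars i)).items (fun p => p.2) true with
    | [] => []
    | [p0] => [String.ofList [p0.1]]
    | p0 :: p1 :: _ => if p0.2 == p1.2 then [tie_char] else [String.ofList [p0.1]]

-- what B emits for one column counter (proof-only helper)
def gB (tie_char : String) (counts : PySem.Dict Char Int) : List String :=
  if counts.items.isEmpty then ["-"]
  else
    let m := (PySem.List.max? counts.values (fun v => v)).getD 0
    let top := (counts.items.filter (fun p => p.2 == m)).map (fun p => p.1)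
    if 1 < top.length then [tie_char] else [String.ofList [top.headD ' ']]

lemma foldA_eq (seqs ignore_chars : List String) (tie_char : String) (n : Nat) :
    (List.range n).foldl (fun acc i =>
      let col : List Char := seqs.foldl (fun col s =>
        if i < s.toList.length then
          let aa := s.toList.getD i ' '
          if String.ofList [aa] ∈ ignore_chars then col else col ++ [aa]
        else col) []
      if col = [] then acc ++ ["-"]
      else
        let counts := PySem.Dict.counter col
        let mc := PySem.List.sorted counts.items (fun p => p.2) true
        match mc with
        | [] => acc
        | [p0] => acc ++ [String.ofList [p0.1]]
        | p0 :: p1 :: _ => if p0.2 == p1.2 then acc ++ [tie_char] else acc ++ [String.ofList [p0.1]]) [] =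
    (List.range n).flatMap (gA seqs ignore_chars tie_char) := by
  have h : ∀ (acc : List String) (i : Nat), i ∈ List.range n →
      (fun acc i =>
        let col : List Char := seqs.foldl (fun col s =>
          if i < s.toList.length then
            let aa := s.toList.getD i ' '
            if String.ofList [aa] ∈ ignore_chars then col else col ++ [aa]
          else col) []
        if col = [] then acc ++ ["-"]
        else
          let counts := PySem.Dict.counter col
          let mc := PySem.List.sorted counts.items (fun p => p.2) true
          match mc with
          | [] => acc
          | [p0] => acc ++ [String.ofList [p0.1]]
          | p0 :: p1 :: _ => if p0.2 == p1.2 then acc ++ [tie_char] else acc ++ [String.ofList [p0.1]]) acc i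
      = acc ++ gA seqs ignore_chars tie_char i := by
    intro acc i _
    dsimp only
    rw [colA_eq]
    unfold gA
    by_cases hc : colAt seqs ignore_chars i = []
    · rw [if_pos hc, if_pos hc]
    · rw [if_neg hc, if_neg hc]
      cases PySem.List.sorted (PySem.Dict.counter (colAt seqs ignore_chars i)).items (fun p => p.2) true with
      | nil => simp
      | cons p0 rest =>
        cases rest with
        | nil => rfl
        | cons p1 r2 => dsimp only; split <;> rfl
  exact (PySem.List.foldl_congr_mem _ _ _ _ h).trans
    ((PySem.List.foldl_append_eq_flatMap _ _ _).trans (List.nil_append _))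

lemma foldB_eq (tie_char : String) (tbl : List (PySem.Dict Char Int)) :
    tbl.foldl (fun out counts =>
      if counts.items.isEmpty then out ++ ["-"]
      else
        let m := (PySem.List.max? counts.values (fun v => v)).getD 0
        let top := (counts.items.filter (fun p => p.2 == m)).map (fun p => p.1)
        if 1 < top.length then out ++ [tie_char] else out ++ [String.ofList [top.headD ' ']]) [] =
    tbl.flatMap (gB tie_char) := by
  have h : ∀ (out : List String) (c : PySem.Dict Char Int), c ∈ tbl →
      (fun out counts =>
        if counts.items.isEmpty then out ++ ["-"]
        else
          let m := (PySem.List.max? counts.values (fun v => v)).getD 0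
          let top := (counts.items.filter (fun p => p.2 == m)).map (fun p => p.1)
          if 1 < top.length then out ++ [tie_char] else out ++ [String.ofList [top.headD ' ']]) out c
      = out ++ gB tie_char c := by
    intro out c _
    unfold gB
    dsimp only
    split_ifs <;> rfl
  exact (PySem.List.foldl_congr_mem _ _ _ _ h).trans
    ((PySem.List.foldl_append_eq_flatMap _ _ _).trans (List.nil_append _))

lemma g_eq (seqs ignore_chars : List String) (tie_char : String) (i : Nat) :
    gA seqs ignore_chars tie_char i = gB tie_char (PySem.Dict.counter (colAt seqs ignore_chars i)) := by
  unfold gA gB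
  by_cases hc : colAt seqs ignore_chars i = []
  · rw [if_pos hc, hc]
    rfl
  · have hne : (PySem.Dict.counter (colAt seqs ignore_chars i)).items.isEmpty = false := by
      obtain ⟨c, col', he⟩ := List.exists_cons_of_ne_nil hc
      rw [List.isEmpty_eq_false_iff, PySem.Dict.items_counter]
      intro hnil
      simp only [List.map_eq_nil_iff] at hnil
      have : c ∈ PySem.Set.ofList (colAt seqs ignore_chars i) := by
        rw [PySem.Set.mem_ofList, he]; exact List.mem_cons_self
      rw [hnil] at this; cases this
    rw [if_neg hc, if_neg (by simp [hne])]
    exact decide_eq _ hc tie_char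

-- ===== VERDICT (by name: the statement is the Claim_ definition above) =====
theorem consensus_from_seqs_spec : Claim_equal_consensus_from_seqs := by
  intro seqs ignore_chars tie_char _
  unfold Spec_consensus_from_seqs consensus_from_seqs consensus_from_seqs_alt
  by_cases hs : seqs = []
  · rw [if_pos hs, if_pos hs]
  · rw [if_neg hs, if_neg hs]
    dsimp only
    rw [table_eq, foldA_eq, foldB_eq]
    congr 1
    rw [List.flatMap_map]
    have hg : gA seqs ignore_chars tie_char =
        fun j => gB tie_char (PySem.Dict.counter (colAt seqs ignore_chars j)) :=
      funext (g_eq seqs ignore_chars tie_char)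
    rw [hg]
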